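-- pv_equiv track=rewrite | github.com/flameproofsocks/Class-Scheduler-447 | fileOperations.py | scheduleRead
-- ===== SOURCE A (Python) =====
-- def flip(a):
--     # If you have a zero
--     if a == 0:
--         return 1 # Give back a one
--     else: # Otherwise, you have a one
--         return 0 # And should give back a zero
--
-- def scheduleRead(line, delimiter):
--     temp = ""
--     store = []
--     profCheck = 0 # Initialize to not being a professor's name
--
--     for i in line:
--         if i == '"': # Clicks on and off based on quotation marks for reading the professor's name
--             profCheck = flip(profCheck)
--
--
--         if profCheck == 0: # If you're not dealing with a professor's name
--             if i != delimiter: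
--                 temp += i
--             else:
--                 store.append(temp)
--                 temp = ""
--         else:
--             # You are reading a professor's name, currently
--             temp += i
--             #store.append(temp) # This will include the delimiter
--             #temp = ""
--
--     store.append(temp.strip()) # This is to account for the last string that does not have a comma after it
--     return store
-- ===== SOURCE B (Python) =====
-- def scheduleRead(line, delimiter):
--     # Two-pass: first scan records the indices of field boundaries (delimiters
--     # outside quotes), then the fields are cut out of `line` by slicing.
--     cuts = []
--     inq = False
--     for i, c in enumerate(line):
--         if c == '"':
--             inq = not inq
--         if not inq and c == delimiter:
--             cuts.append(i)
--     out = []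
--     start = 0
--     for pos in cuts:
--         out.append(line[start:pos])
--         start = pos + 1
--     out.append(line[start:].strip())
--     return out
-- ===== Notes on version B (the rewrite author's own statement) =====
-- stated objective: alternative
-- what changed: Replaces A's single pass that accumulates a growing temp string character by character with a two-pass index-then-slice scheme: a first scan records only the boundary indices (delimiters outside quotes), then the fields are produced by slicing the original line between consecutive boundaries, stripping only the last slice.
import Mathlib
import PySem

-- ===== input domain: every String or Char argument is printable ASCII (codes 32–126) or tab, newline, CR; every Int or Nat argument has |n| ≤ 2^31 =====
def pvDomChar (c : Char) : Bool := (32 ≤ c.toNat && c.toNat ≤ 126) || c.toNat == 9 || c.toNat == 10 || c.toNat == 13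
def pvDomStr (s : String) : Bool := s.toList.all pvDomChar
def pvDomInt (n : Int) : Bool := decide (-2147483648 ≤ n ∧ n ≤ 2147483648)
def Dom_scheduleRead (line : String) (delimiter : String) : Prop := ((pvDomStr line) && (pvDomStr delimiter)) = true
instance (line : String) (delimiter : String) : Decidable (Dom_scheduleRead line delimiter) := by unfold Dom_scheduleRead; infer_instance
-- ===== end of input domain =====

-- B replaces A's one-pass temp-accumulating scan by a two-pass index-then-slice scheme
-- (record boundary indices, then slice the line between them); alternative decomposition, same cost.

-- ===== PORT A =====
def pyFlip (a : Int) : Int := if a == 0 then 1 else 0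

def stepA (d : List Char) (s : List Char × List (List Char) × Int) (i : Char) :
    List Char × List (List Char) × Int :=
  let pc := if i == '"' then pyFlip s.2.2 else s.2.2
  if pc == 0 then
    if [i] ≠ d then (s.1 ++ [i], s.2.1, pc)
    else ([], s.2.1 ++ [s.1], pc)
  else (s.1 ++ [i], s.2.1, pc)

def scheduleRead (line : String) (delimiter : String) : List String :=
  let fin := line.toList.foldl (stepA delimiter.toList) ([], [], 0)
  (fin.2.1 ++ [PySem.Chars.strip fin.1]).map String.ofList

-- ===== PORT B =====
def stepCut (d : List Char) (s : List Int × Bool) (p : Int × Char) : List Int × Bool :=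
  let inq := if p.2 == '"' then !s.2 else s.2
  if !inq && [p.2] == d then (s.1 ++ [p.1], inq) else (s.1, inq)

def stepSlice (cs : List Char) (s : List (List Char) × Int) (pos : Int) :
    List (List Char) × Int :=
  (s.1 ++ [PySem.List.slice cs (some s.2) (some pos)], pos + 1)

def scheduleRead_alt (line : String) (delimiter : String) : List String :=
  let cs := line.toList
  let cuts := ((PySem.List.enumerate cs).foldl (stepCut delimiter.toList) ([], false)).1
  let res := cuts.foldl (stepSlice cs) ([], 0)
  (res.1 ++ [PySem.Chars.strip (PySem.List.slice cs (some res.2) none)]).map String.ofList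

-- ===== PRECONDITION & SPEC =====
def Spec_scheduleRead (line : String) (delimiter : String) (out : List String) : Prop := out = scheduleRead_alt line delimiter
instance (line : String) (delimiter : String) (out : List String) : Decidable (Spec_scheduleRead line delimiter out) := by unfold Spec_scheduleRead; infer_instance

-- ===== CLAIM (what is proved, stated in full; the proofs are below) =====
def Claim_equal_scheduleRead : Prop := ∀ (line : String) (delimiter : String), Dom_scheduleRead line delimiter → Spec_scheduleRead line delimiter (scheduleRead line delimiter)

-- ===== LEMMAS AND PROOFS =====

/-- The list of fields (as char lists) the quote-aware split produces. -/
def fieldsRec (d : List Char) : List Char → Bool → List (List Char)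
  | [], _ => [[]]
  | c :: cs, inq =>
      let inq' := if c == '"' then !inq else inq
      if !inq' && [c] == d then [] :: fieldsRec d cs inq'
      else
        match fieldsRec d cs inq' with
        | [] => [[c]]
        | f :: r => (c :: f) :: r

theorem fieldsRec_ne_nil (d : List Char) (cs : List Char) (inq : Bool) :
    fieldsRec d cs inq ≠ [] := by
  cases cs with
  | nil => simp [fieldsRec]
  | cons c cs =>
      simp only [fieldsRec]
      (repeat' split) <;> simp

/-- Map to strings, stripping only the last field. -/
def finishF : List (List Char) → List String
  | [] => []
  | [f] => [String.ofList (PySem.Chars.strip f)]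
  | f :: g :: fs => String.ofList f :: finishF (g :: fs)

theorem finishF_cons (f : List Char) (F : List (List Char)) (h : F ≠ []) :
    finishF (f :: F) = String.ofList f :: finishF F := by
  cases F with
  | nil => exact absurd rfl h
  | cons g fs => rfl

theorem modifyHead_nil_append (F : List (List Char)) :
    F.modifyHead (fun f => [] ++ f) = F := by
  cases F <;> simp

def pcOf (inq : Bool) : Int := if inq then 1 else 0

theorem A_loop (d : List Char) (cs : List Char) :
    ∀ (inq : Bool) (temp : List Char) (store : List (List Char)),
    (let fin := cs.foldl (stepA d) (temp, store, pcOf inq)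
     (fin.2.1 ++ [PySem.Chars.strip fin.1]).map String.ofList)
    = store.map String.ofList ++ finishF ((fieldsRec d cs inq).modifyHead (temp ++ ·)) := by
  induction cs with
  | nil =>
      intro inq temp store
      simp [fieldsRec, finishF, List.modifyHead]
  | cons c cs ih =>
      intro inq temp store
      simp only [List.foldl_cons]
      have hstep : stepA d (temp, store, pcOf inq) c =
          (let inq' := if c == '"' then !inq else inq
           if !inq' && [c] == d then ([], store ++ [temp], pcOf inq')
           else (temp ++ [c], store, pcOf inq')) := by
        unfold stepA pyFlip
        cases hq : (c == '"') <;> cases inq <;>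
          simp only [pcOf] <;>
          by_cases hd : [c] = d <;> simp [hd]
      rw [hstep]
      simp only [fieldsRec]
      set inq' := if c == '"' then !inq else inq with hinq'
      by_cases hcut : (!inq' && [c] == d) = true
      · simp only [hcut, if_pos]
        rw [ih inq' [] (store ++ [temp])]
        rw [modifyHead_nil_append]
        rw [show (List.modifyHead (fun x => temp ++ x) ([] :: fieldsRec d cs inq'))
              = (temp ++ []) :: fieldsRec d cs inq' from rfl]
        rw [finishF_cons _ _ (fieldsRec_ne_nil d cs inq')]
        simp
      · simp only [hcut, if_neg, Bool.not_eq_true]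
        rw [ih inq' (temp ++ [c]) store]
        cases hF : fieldsRec d cs inq' with
        | nil => exact absurd hF (fieldsRec_ne_nil d cs inq')
        | cons f r => simp [List.modifyHead]

theorem cut_acc (d : List Char) (l : List (Int × Char)) :
    ∀ (acc : List Int) (inq : Bool),
    l.foldl (stepCut d) (acc, inq)
      = (acc ++ (l.foldl (stepCut d) ([], inq)).1, (l.foldl (stepCut d) ([], inq)).2) := by
  induction l with
  | nil => intro acc inq; simp
  | cons p l ih =>
      intro acc inq
      simp only [List.foldl_cons]
      set inq' := if p.2 == '"' then !inq else inq with hinq'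
      by_cases h : (!inq' && [p.2] == d) = true
      · rw [show stepCut d (acc, inq) p = (acc ++ [p.1], inq') from by
              simp only [stepCut, ← hinq', h, if_pos],
            show stepCut d ([], inq) p = ([p.1], inq') from by
              simp only [stepCut, ← hinq', h, if_pos]; rfl]
        rw [ih (acc ++ [p.1]) inq', ih [p.1] inq']
        simp
      · rw [show stepCut d (acc, inq) p = (acc, inq') from by
              simp only [stepCut, ← hinq', h, if_neg, Bool.not_eq_true],
            show stepCut d ([], inq) p = ([], inq') from by
              simp only [stepCut, ← hinq', h, if_neg, Bool.not_eq_true]]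
        exact ih acc inq'

/-- Relative recursion computing the cut indices. -/
def cutsRec (d : List Char) : List Char → Int → Bool → List Int
  | [], _, _ => []
  | c :: cs, n, inq =>
      let inq' := if c == '"' then !inq else inq
      if !inq' && [c] == d then n :: cutsRec d cs (n + 1) inq'
      else cutsRec d cs (n + 1) inq'

theorem cuts_eq (d : List Char) (cs : List Char) :
    ∀ (n : Int) (inq : Bool),
    ((PySem.List.enumerate cs n).foldl (stepCut d) ([], inq)).1 = cutsRec d cs n inq := by
  induction cs with
  | nil => intro n inq; simp [PySem.List.enumerate_nil, cutsRec]
  | cons c cs ih =>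
      intro n inq
      rw [PySem.List.enumerate_cons]
      simp only [List.foldl_cons, cutsRec]
      set inq' := if c == '"' then !inq else inq with hinq'
      by_cases h : (!inq' && [c] == d) = true
      · rw [show stepCut d ([], inq) (n, c) = ([n], inq') from by
              simp only [stepCut, ← hinq', h, if_pos]; rfl]
        rw [cut_acc d _ [n] inq']
        simp only [h, if_pos]
        simp [ih (n + 1) inq']
      · rw [show stepCut d ([], inq) (n, c) = ([], inq') from by
              simp only [stepCut, ← hinq', h, if_neg, Bool.not_eq_true]]
        simp only [h, if_neg, Bool.not_eq_true]
        exact ih (n + 1) inq'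

theorem B_loop (d : List Char) (full : List Char) (cs : List Char) :
    ∀ (inq : Bool) (pre : List Char) (out : List (List Char)) (m : Nat),
    full.drop m = pre ++ cs →
    (let res := (cutsRec d cs ((m + pre.length : Nat) : Int) inq).foldl (stepSlice full)
        (out, (m : Int))
     (res.1 ++ [PySem.Chars.strip (PySem.List.slice full (some res.2) none)]).map String.ofList)
    = out.map String.ofList ++ finishF ((fieldsRec d cs inq).modifyHead (pre ++ ·)) := by
  induction cs with
  | nil =>
      intro inq pre out m hdrop
      simp only [cutsRec, List.foldl_nil]
      rw [PySem.List.slice_from_natCast, hdrop]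
      simp [fieldsRec, finishF, List.modifyHead]
  | cons c cs ih =>
      intro inq pre out m hdrop
      simp only [cutsRec, fieldsRec]
      set inq' := if c == '"' then !inq else inq with hinq'
      have hdropn : full.drop (m + pre.length) = c :: cs := by
        rw [← List.drop_drop, hdrop, List.drop_left]
      have hdrop1 : full.drop (m + pre.length + 1) = cs := by
        rw [← List.drop_drop, hdropn, List.drop_one, List.tail_cons]
      by_cases hcut : (!inq' && [c] == d) = true
      · simp only [hcut, if_pos, List.foldl_cons]
        have hidx : ((m + pre.length : Nat) : Int) + 1 = ((m + pre.length + 1 : Nat) : Int) := by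
          push_cast; ring
        have hslice : PySem.List.slice full (some (m : Int))
            (some ((m + pre.length : Nat) : Int)) = pre := by
          have hc : ((m + pre.length : Nat) : Int) = (m : Int) + (pre.length : Int) := by
            push_cast; ring
          rw [hc, PySem.List.slice_natCast_add, hdrop, List.take_left]
        rw [show stepSlice full (out, (m : Int)) ((m + pre.length : Nat) : Int)
              = (out ++ [pre], ((m + pre.length : Nat) : Int) + 1) from by
              simp only [stepSlice, hslice]]
        rw [hidx]
        have hIH := ih inq' [] (out ++ [pre]) (m + pre.length + 1) (by simpa using hdrop1)
        simp only [List.length_nil, Nat.add_zero] at hIH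
        rw [hIH, modifyHead_nil_append]
        rw [show (List.modifyHead (fun x => pre ++ x) ([] :: fieldsRec d cs inq'))
              = (pre ++ []) :: fieldsRec d cs inq' from rfl]
        rw [finishF_cons _ _ (fieldsRec_ne_nil d cs inq')]
        simp
      · simp only [hcut, if_neg, Bool.not_eq_true]
        have hidx : ((m + pre.length : Nat) : Int) + 1 = ((m + (pre ++ [c]).length : Nat) : Int) := by
          simp; ring
        rw [hidx]
        rw [ih inq' (pre ++ [c]) out m (by rw [hdrop]; simp)]
        cases hF : fieldsRec d cs inq' with
        | nil => exact absurd hF (fieldsRec_ne_nil d cs inq')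
        | cons f r => simp [List.modifyHead]

-- ===== VERDICT (by name: the statement is the Claim_ definition above) =====
theorem scheduleRead_spec : Claim_equal_scheduleRead := by
  intro line delimiter _
  unfold Spec_scheduleRead scheduleRead scheduleRead_alt
  dsimp only
  rw [cuts_eq]
  have hA := A_loop delimiter.toList line.toList false [] []
  have hB := B_loop delimiter.toList line.toList line.toList false [] [] 0 (by simp)
  simp only [List.length_nil, Nat.add_zero, Nat.cast_zero] at hB
  norm_num [pcOf] at hA
  simp only [List.map_append, List.map_cons, List.map_nil] at hA hB ⊢
  exact hA.trans hB.symm
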